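-- pv_equiv track=rewrite | github.com/VaishnaviSidral/Biometrics-Attendance | backend/services/time_calculator.py | calculate_weekly_compliance
-- ===== SOURCE A (Python) =====
-- from typing import List, Dict, Tuple, Optional
--
-- def calculate_weekly_compliance(
--     daily_statuses: List[str],
--     present_days: int,
--     required_days: int,
--     is_wfh: bool = False
-- ) -> str:
--
--     # Step 1: WFH always compliant
--     if is_wfh:
--         return "Compliance"
--
--     # Step 2: If the entire week is Leave / Official Leave
--     if all(s in ["Leave", "Official Leave"] for s in daily_statuses):
--         return "Leave"
--
--     # Step 3: Remove non-working days
--     valid_statuses = [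
--         s for s in daily_statuses
--         if s not in ["Leave", "Official Leave", "Holiday", "Weekend"]
--     ]
--
--     if not valid_statuses:
--         return "Compliance"
--
--     # Step 4: If any Non-Compliance
--     if "Non-Compliance" in valid_statuses:
--         return "Non-Compliance"
--
--     # Step 5: If all Compliance
--     if all(s == "Compliance" for s in valid_statuses):
--         return "Compliance"
--
--     # Step 6: Otherwise Mid
--     return "Mid-Compliance"
-- ===== SOURCE B (Python) =====
-- def calculate_weekly_compliance(
--     daily_statuses,
--     present_days,
--     required_days,
--     is_wfh=False,
-- ):
--     if is_wfh:
--         return "Compliance"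
--     all_leave = True
--     has_valid = False
--     has_nc = False
--     has_other = False
--     for s in daily_statuses:
--         is_leave = s == "Leave" or s == "Official Leave"
--         is_valid = not (is_leave or s == "Holiday" or s == "Weekend")
--         all_leave = all_leave and is_leave
--         has_valid = has_valid or is_valid
--         has_nc = has_nc or (is_valid and s == "Non-Compliance")
--         has_other = has_other or (is_valid and s != "Compliance" and s != "Non-Compliance")
--     if all_leave:
--         return "Leave"
--     if not has_valid:
--         return "Compliance"
--     if has_nc:
--         return "Non-Compliance"
--     if not has_other:
--         return "Compliance"
--     return "Mid-Compliance"
-- ===== Notes on version B (the rewrite author's own statement) =====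
-- stated objective: alternative
-- what changed: Replaces A's four separate passes (all(), a filter building an intermediate list, an 'in' scan, another all()) with a single loop accumulating four boolean flags and a priority decision afterwards; no intermediate list is built.
import Mathlib
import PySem

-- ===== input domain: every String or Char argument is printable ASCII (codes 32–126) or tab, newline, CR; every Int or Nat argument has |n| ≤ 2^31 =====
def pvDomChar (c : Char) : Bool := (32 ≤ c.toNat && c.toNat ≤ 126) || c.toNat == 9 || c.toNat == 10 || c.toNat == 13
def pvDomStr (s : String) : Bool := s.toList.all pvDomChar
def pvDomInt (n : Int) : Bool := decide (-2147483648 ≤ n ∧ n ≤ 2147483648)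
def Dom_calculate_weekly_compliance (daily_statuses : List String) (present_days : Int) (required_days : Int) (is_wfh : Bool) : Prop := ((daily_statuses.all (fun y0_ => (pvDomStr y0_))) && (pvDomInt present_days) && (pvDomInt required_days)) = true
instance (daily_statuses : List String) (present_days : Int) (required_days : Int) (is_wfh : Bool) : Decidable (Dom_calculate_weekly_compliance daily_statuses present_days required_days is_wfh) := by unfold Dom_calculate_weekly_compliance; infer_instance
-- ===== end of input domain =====

-- B replaces A's four sequential passes (all / filter / contains / all) with one single-pass
-- fold accumulating four flags; same return value, no intermediate list (objective: alternative).


-- ===== PORT A =====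
def calculate_weekly_compliance (daily_statuses : List String) (present_days : Int) (required_days : Int) (is_wfh : Bool) : String :=
  if is_wfh then "Compliance"
  else if daily_statuses.all (fun s => (["Leave", "Official Leave"] : List String).contains s) then "Leave"
  else
    let valid_statuses := daily_statuses.filter
      (fun s => !(["Leave", "Official Leave", "Holiday", "Weekend"] : List String).contains s)
    if valid_statuses = [] then "Compliance"
    else if valid_statuses.contains "Non-Compliance" then "Non-Compliance"
    else if valid_statuses.all (fun s => s == "Compliance") then "Compliance"
    else "Mid-Compliance"

-- ===== PORT B =====
-- one step of B's single-pass loop over the four flags (all_leave, has_valid, has_nc, has_other)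
def pvStep (acc : Bool × Bool × Bool × Bool) (s : String) : Bool × Bool × Bool × Bool :=
  let is_leave := s == "Leave" || s == "Official Leave"
  let is_valid := !(is_leave || s == "Holiday" || s == "Weekend")
  (acc.1 && is_leave,
   acc.2.1 || is_valid,
   acc.2.2.1 || (is_valid && s == "Non-Compliance"),
   acc.2.2.2 || (is_valid && s != "Compliance" && s != "Non-Compliance"))

def calculate_weekly_compliance_alt (daily_statuses : List String) (present_days : Int) (required_days : Int) (is_wfh : Bool) : String :=
  if is_wfh then "Compliance"
  else
    let st := daily_statuses.foldl pvStep (true, false, false, false)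
    if st.1 then "Leave"
    else if !st.2.1 then "Compliance"
    else if st.2.2.1 then "Non-Compliance"
    else if !st.2.2.2 then "Compliance"
    else "Mid-Compliance"

-- ===== PRECONDITION & SPEC =====
def Spec_calculate_weekly_compliance (daily_statuses : List String) (present_days : Int) (required_days : Int) (is_wfh : Bool) (out : String) : Prop := out = calculate_weekly_compliance_alt daily_statuses present_days required_days is_wfh
instance (daily_statuses : List String) (present_days : Int) (required_days : Int) (is_wfh : Bool) (out : String) : Decidable (Spec_calculate_weekly_compliance daily_statuses present_days required_days is_wfh out) := by unfold Spec_calculate_weekly_compliance; infer_instance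

-- ===== CLAIM (what is proved, stated in full; the proofs are below) =====
def Claim_equal_calculate_weekly_compliance : Prop := ∀ (daily_statuses : List String) (present_days : Int) (required_days : Int) (is_wfh : Bool), Dom_calculate_weekly_compliance daily_statuses present_days required_days is_wfh → Spec_calculate_weekly_compliance daily_statuses present_days required_days is_wfh (calculate_weekly_compliance daily_statuses present_days required_days is_wfh)

-- ===== LEMMAS AND PROOFS =====

def pvIsLeave (s : String) : Bool := s == "Leave" || s == "Official Leave"
def pvIsValid (s : String) : Bool := !(pvIsLeave s || s == "Holiday" || s == "Weekend")
def pvIsNC (s : String) : Bool := pvIsValid s && s == "Non-Compliance"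
def pvIsOther (s : String) : Bool := pvIsValid s && s != "Compliance" && s != "Non-Compliance"

theorem pt_leave (s : String) : ((["Leave", "Official Leave"] : List String).contains s) = pvIsLeave s := by
  by_cases h1 : s = "Leave" <;> by_cases h2 : s = "Official Leave" <;>
    simp [pvIsLeave, h1, h2]

theorem pt_valid (s : String) :
    (!((["Leave", "Official Leave", "Holiday", "Weekend"] : List String).contains s)) = pvIsValid s := by
  by_cases h1 : s = "Leave" <;> by_cases h2 : s = "Official Leave" <;>
    by_cases h3 : s = "Holiday" <;> by_cases h4 : s = "Weekend" <;>
    simp [pvIsValid, pvIsLeave, h1, h2, h3, h4]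

-- characterisation of B's fold: each flag is its list predicate joined with the seed
theorem pvFold_char (l : List String) (a v n o : Bool) :
    l.foldl pvStep (a, v, n, o) =
      (a && l.all pvIsLeave, v || l.any pvIsValid, n || l.any pvIsNC, o || l.any pvIsOther) := by
  induction l generalizing a v n o with
  | nil => simp
  | cons s t ih =>
      simp only [List.foldl_cons, List.all_cons, List.any_cons, pvStep, ih,
        pvIsLeave, pvIsValid, pvIsNC, pvIsOther]
      simp [Bool.and_assoc, Bool.or_assoc]

theorem filt_eq (ds : List String) :
    ds.filter (fun s => !((["Leave", "Official Leave", "Holiday", "Weekend"] : List String).contains s)) =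
      ds.filter pvIsValid := by
  simp only [pt_valid]

theorem empty_iff (ds : List String) : ds.filter pvIsValid = [] ↔ ds.any pvIsValid = false := by
  rw [List.filter_eq_nil_iff, ← Bool.not_eq_true, List.any_eq_true]
  simp

theorem contains_nc (ds : List String) :
    (ds.filter pvIsValid).contains "Non-Compliance" = ds.any pvIsNC := by
  rw [List.contains_eq_any_beq, List.any_filter]
  congr 1
  funext s
  rw [pvIsNC, BEq.comm]

theorem all_comp (ds : List String) (hN : ds.any pvIsNC = false) :
    ((ds.filter pvIsValid).all (fun s => s == "Compliance")) = !ds.any pvIsOther := by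
  induction ds with
  | nil => simp [List.filter]
  | cons s t ih =>
      simp only [List.any_cons, Bool.or_eq_false_iff] at hN
      by_cases hv : pvIsValid s = true
      · by_cases hc : s = "Compliance"
        · subst hc
          simp [pvIsValid, pvIsLeave, pvIsOther, ih hN.2]
        · have hn : ¬s = "Non-Compliance" := by
            intro h
            rw [pvIsNC, hv, Bool.true_and] at hN
            simp [h] at hN
          have h1 : (s == "Compliance") = false := by simpa using hc
          have h2 : (s != "Compliance") = true := by simpa [bne] using hc
          have h3 : (s != "Non-Compliance") = true := by simpa [bne] using hn
          simp [hv, pvIsOther, h1, h2, h3, ih hN.2]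
      · simp [Bool.eq_false_iff.mpr hv, pvIsOther, ih hN.2]

-- ===== VERDICT (by name: the statement is the Claim_ definition above) =====
theorem calculate_weekly_compliance_spec : Claim_equal_calculate_weekly_compliance := by
  intro ds p r w _
  unfold Spec_calculate_weekly_compliance calculate_weekly_compliance calculate_weekly_compliance_alt
  cases w
  · simp only [Bool.false_eq_true, if_false, pvFold_char, Bool.true_and, Bool.false_or,
      pt_leave, filt_eq]
    by_cases hL : ds.all pvIsLeave = true
    · rw [if_pos hL, if_pos hL]
    · rw [if_neg hL, if_neg hL]
      by_cases hV : ds.any pvIsValid = true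
      · have hne : ¬(ds.filter pvIsValid = []) := by
          rw [empty_iff, hV]; simp
        rw [if_neg hne]
        have hVn : ¬((!ds.any pvIsValid) = true) := by simp [hV]
        rw [if_neg hVn, contains_nc]
        by_cases hN : ds.any pvIsNC = true
        · rw [if_pos hN, if_pos hN]
        · have hNf : ds.any pvIsNC = false := Bool.eq_false_iff.mpr hN
          rw [if_neg hN, if_neg hN, all_comp ds hNf]
      · have hVf : ds.any pvIsValid = false := Bool.eq_false_iff.mpr hV
        rw [if_pos ((empty_iff ds).mpr hVf), hVf]
        simp
  · simp
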